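-- pv_equiv track=rewrite | github.com/drhannahsc-arch/MABE | core/conductive_base.py | check_click_compatibility
-- ===== SOURCE A (Python) =====
-- from typing import List, Optional, Tuple
--
-- _CLICK_PAIRS = {
--     "CuAAC": ({"-N3", "azide"}, {"-alkyne", "alkyne"}),
--     "SPAAC": ({"-N3", "azide"}, {"-cyclooctyne", "DBCO"}),
--     "thiol-maleimide": ({"thiol-Ag", "thiol-Cu", "-SH"}, {"-maleimide", "maleimide"}),
-- }
--
-- def check_click_compatibility(
--     handle_a: str,
--     handle_b: str,
-- ) -> Optional[str]:
--     """
--     Check if two click handles are complementary.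
--
--     Returns the click chemistry name if compatible, None otherwise.
--     Order-independent: checks (a in group1 and b in group2) OR vice versa.
--     """
--     for click_name, (group1, group2) in _CLICK_PAIRS.items():
--         if (handle_a in group1 and handle_b in group2) or \
--            (handle_a in group2 and handle_b in group1):
--             return click_name
--     return None
-- ===== SOURCE B (Python) =====
-- from typing import Optional
--
-- _CLICK_HANDLE_GROUPS = [
--     ("CuAAC", ("-N3", "azide"), ("-alkyne", "alkyne")),
--     ("SPAAC", ("-N3", "azide"), ("-cyclooctyne", "DBCO")),
--     ("thiol-maleimide", ("thiol-Ag", "thiol-Cu", "-SH"), ("-maleimide", "maleimide")),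
-- ]
--
-- # Precomputed table: every compatible ordered handle pair -> click name (first match kept).
-- _LOOKUP = {}
-- for _name, _g1, _g2 in _CLICK_HANDLE_GROUPS:
--     for _x in _g1:
--         for _y in _g2:
--             _LOOKUP.setdefault((_x, _y), _name)
--             _LOOKUP.setdefault((_y, _x), _name)
--
-- def check_click_compatibility(handle_a: str, handle_b: str) -> Optional[str]:
--     return _LOOKUP.get((handle_a, handle_b))
-- ===== Notes on version B (the rewrite author's own statement) =====
-- stated objective: idiomatic
-- what changed: Replaces the per-call scan over _CLICK_PAIRS with a module-level precomputed dict mapping each ordered compatible handle pair to its click name, so the function is a single dict lookup.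
import Mathlib
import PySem

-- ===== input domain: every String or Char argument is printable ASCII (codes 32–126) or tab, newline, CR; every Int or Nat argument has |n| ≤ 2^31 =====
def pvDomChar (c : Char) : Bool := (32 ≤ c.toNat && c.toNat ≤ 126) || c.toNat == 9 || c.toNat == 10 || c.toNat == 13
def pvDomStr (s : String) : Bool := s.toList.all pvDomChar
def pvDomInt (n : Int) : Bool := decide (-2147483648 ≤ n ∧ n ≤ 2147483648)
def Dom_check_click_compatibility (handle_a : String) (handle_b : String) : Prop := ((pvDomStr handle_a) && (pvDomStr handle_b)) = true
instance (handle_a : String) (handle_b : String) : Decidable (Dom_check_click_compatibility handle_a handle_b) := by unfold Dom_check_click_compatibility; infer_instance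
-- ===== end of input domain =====

-- ===== PORT A =====
-- B changes: per-call scan over the click table replaced by one precomputed pair->name dict lookup (idiomatic).
def pvClickPairsA : List (String × (PySem.Set String × PySem.Set String)) :=
  [("CuAAC", (PySem.Set.ofList ["-N3", "azide"], PySem.Set.ofList ["-alkyne", "alkyne"])),
   ("SPAAC", (PySem.Set.ofList ["-N3", "azide"], PySem.Set.ofList ["-cyclooctyne", "DBCO"])),
   ("thiol-maleimide", (PySem.Set.ofList ["thiol-Ag", "thiol-Cu", "-SH"], PySem.Set.ofList ["-maleimide", "maleimide"]))]

-- the 'for click_name, (group1, group2) in _CLICK_PAIRS.items():' loop with its early return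
def pvClickLoopA : List (String × (PySem.Set String × PySem.Set String)) → String → String → Option String
  | [], _, _ => none
  | (click_name, (group1, group2)) :: rest, handle_a, handle_b =>
    if (group1.contains handle_a && group2.contains handle_b) ||
       (group2.contains handle_a && group1.contains handle_b) then some click_name
    else pvClickLoopA rest handle_a handle_b

def check_click_compatibility (handle_a : String) (handle_b : String) : Option String :=
  pvClickLoopA pvClickPairsA handle_a handle_b

-- ===== PORT B =====
def pvClickGroupsB : List (String × List String × List String) :=
  [("CuAAC", ["-N3", "azide"], ["-alkyne", "alkyne"]),
   ("SPAAC", ["-N3", "azide"], ["-cyclooctyne", "DBCO"]),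
   ("thiol-maleimide", ["thiol-Ag", "thiol-Cu", "-SH"], ["-maleimide", "maleimide"])]

-- module-level build of _LOOKUP via setdefault, as in Source B
def pvLookup : PySem.Dict (String × String) String :=
  pvClickGroupsB.foldl
    (fun d e =>
      e.2.1.foldl (fun d x =>
        e.2.2.foldl (fun d y =>
          PySem.Dict.setdefault (PySem.Dict.setdefault d (x, y) e.1) (y, x) e.1) d) d)
    PySem.Dict.empty

def check_click_compatibility_alt (handle_a : String) (handle_b : String) : Option String :=
  pvLookup.get? (handle_a, handle_b)

-- ===== PRECONDITION & SPEC =====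
def Spec_check_click_compatibility (handle_a : String) (handle_b : String) (out : Option String) : Prop := out = check_click_compatibility_alt handle_a handle_b
instance (handle_a : String) (handle_b : String) (out : Option String) : Decidable (Spec_check_click_compatibility handle_a handle_b out) := by unfold Spec_check_click_compatibility; infer_instance

-- ===== CLAIM (what is proved, stated in full; the proofs are below) =====
def Claim_equal_check_click_compatibility : Prop := ∀ (handle_a : String) (handle_b : String), Dom_check_click_compatibility handle_a handle_b → Spec_check_click_compatibility handle_a handle_b (check_click_compatibility handle_a handle_b)

-- ===== LEMMAS AND PROOFS =====

-- ===== VERDICT (by name: the statement is the Claim_ definition above) =====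
def pvLookupLit : List ((String × String) × String) :=
  [(("-N3", "-alkyne"), "CuAAC"), (("-alkyne", "-N3"), "CuAAC"), (("-N3", "alkyne"), "CuAAC"),
   (("alkyne", "-N3"), "CuAAC"), (("azide", "-alkyne"), "CuAAC"), (("-alkyne", "azide"), "CuAAC"),
   (("azide", "alkyne"), "CuAAC"), (("alkyne", "azide"), "CuAAC"), (("-N3", "-cyclooctyne"), "SPAAC"),
   (("-cyclooctyne", "-N3"), "SPAAC"), (("-N3", "DBCO"), "SPAAC"), (("DBCO", "-N3"), "SPAAC"),
   (("azide", "-cyclooctyne"), "SPAAC"), (("-cyclooctyne", "azide"), "SPAAC"), (("azide", "DBCO"), "SPAAC"),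
   (("DBCO", "azide"), "SPAAC"), (("thiol-Ag", "-maleimide"), "thiol-maleimide"),
   (("-maleimide", "thiol-Ag"), "thiol-maleimide"), (("thiol-Ag", "maleimide"), "thiol-maleimide"),
   (("maleimide", "thiol-Ag"), "thiol-maleimide"), (("thiol-Cu", "-maleimide"), "thiol-maleimide"),
   (("-maleimide", "thiol-Cu"), "thiol-maleimide"), (("thiol-Cu", "maleimide"), "thiol-maleimide"),
   (("maleimide", "thiol-Cu"), "thiol-maleimide"), (("-SH", "-maleimide"), "thiol-maleimide"),
   (("-maleimide", "-SH"), "thiol-maleimide"), (("-SH", "maleimide"), "thiol-maleimide"),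
   (("maleimide", "-SH"), "thiol-maleimide")]

theorem pvLookup_eval : pvLookup = PySem.Dict.mk pvLookupLit := by rfl

-- all handles occurring in the click table
def pvAllHandles : List String :=
  ["-N3", "azide", "-alkyne", "alkyne", "-cyclooctyne", "DBCO",
   "thiol-Ag", "thiol-Cu", "-SH", "-maleimide", "maleimide"]

set_option maxHeartbeats 1000000 in
theorem check_click_compatibility_spec : Claim_equal_check_click_compatibility := by
  intro a b _
  unfold Spec_check_click_compatibility
  by_cases ha : a ∈ pvAllHandles
  · fin_cases ha <;>
    · by_cases hb : b ∈ pvAllHandles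
      · fin_cases hb <;> rfl
      · simp only [pvAllHandles, List.mem_cons, List.not_mem_nil, or_false, not_or] at hb
        obtain ⟨h1, h2, h3, h4, h5, h6, h7, h8, h9, h10, h11⟩ := hb
        simp [check_click_compatibility, check_click_compatibility_alt, pvClickLoopA,
          pvLookup_eval, pvLookupLit, pvClickPairsA, PySem.Dict.get?, PySem.Set.ofList,
          h1, h2, h3, h4, h5, h6, h7, h8, h9, h10, h11,
          Ne.symm h1, Ne.symm h2, Ne.symm h3, Ne.symm h4, Ne.symm h5, Ne.symm h6,
          Ne.symm h7, Ne.symm h8, Ne.symm h9, Ne.symm h10, Ne.symm h11]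
  · simp only [pvAllHandles, List.mem_cons, List.not_mem_nil, or_false, not_or] at ha
    obtain ⟨h1, h2, h3, h4, h5, h6, h7, h8, h9, h10, h11⟩ := ha
    simp [check_click_compatibility, check_click_compatibility_alt, pvClickLoopA,
      pvLookup_eval, pvLookupLit, pvClickPairsA, PySem.Dict.get?, PySem.Set.ofList,
      h1, h2, h3, h4, h5, h6, h7, h8, h9, h10, h11,
      Ne.symm h1, Ne.symm h2, Ne.symm h3, Ne.symm h4, Ne.symm h5, Ne.symm h6,
      Ne.symm h7, Ne.symm h8, Ne.symm h9, Ne.symm h10, Ne.symm h11]
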